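-- pv_equiv track=rewrite | github.com/c50bossio/6fb-dashboard-staging | services/vector_knowledge_service.py | _determine_relevant_knowledge_types
-- ===== SOURCE A (Python) =====
-- from typing import Dict, List, Optional, Any, Tuple
--
-- class BusinessKnowledgeType:
--     """Types of business knowledge we store"""
--     CUSTOMER_INSIGHTS = "customer_insights"
--     SERVICE_PERFORMANCE = "service_performance"
--     REVENUE_PATTERNS = "revenue_patterns"
--     SCHEDULING_ANALYTICS = "scheduling_analytics"
--     MARKETING_EFFECTIVENESS = "marketing_effectiveness"
--     OPERATIONAL_BEST_PRACTICES = "operational_best_practices"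
--     CUSTOMER_FEEDBACK = "customer_feedback"
--     BUSINESS_METRICS = "business_metrics"
--
-- def _determine_relevant_knowledge_types(query: str) -> List[str]:
--     """Determine which knowledge types are relevant for a query"""
--     query_lower = query.lower()
--     relevant_types = []
--
--     if any(word in query_lower for word in ['customer', 'client', 'satisfaction', 'feedback', 'review']):
--         relevant_types.extend([BusinessKnowledgeType.CUSTOMER_INSIGHTS, BusinessKnowledgeType.CUSTOMER_FEEDBACK])
--
--     if any(word in query_lower for word in ['revenue', 'money', 'profit', 'income', 'sales']):
--         relevant_types.append(BusinessKnowledgeType.REVENUE_PATTERNS)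
--
--     if any(word in query_lower for word in ['service', 'cut', 'trim', 'styling', 'performance']):
--         relevant_types.append(BusinessKnowledgeType.SERVICE_PERFORMANCE)
--
--     if any(word in query_lower for word in ['schedule', 'appointment', 'booking', 'time']):
--         relevant_types.append(BusinessKnowledgeType.SCHEDULING_ANALYTICS)
--
--     if any(word in query_lower for word in ['marketing', 'promotion', 'social', 'advertising']):
--         relevant_types.append(BusinessKnowledgeType.MARKETING_EFFECTIVENESS)
--
--     # If no specific types identified, include all for broad search
--     if not relevant_types:
--         relevant_types = [
--             BusinessKnowledgeType.CUSTOMER_INSIGHTS,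
--             BusinessKnowledgeType.SERVICE_PERFORMANCE,
--             BusinessKnowledgeType.REVENUE_PATTERNS,
--             BusinessKnowledgeType.OPERATIONAL_BEST_PRACTICES
--         ]
--
--     return relevant_types
-- ===== SOURCE B (Python) =====
-- def _determine_relevant_knowledge_types(query: str):
--     """Multi-pattern single scan: walk the lowercased query once position by
--     position; at each position try every keyword of a keyword->category table
--     and flag that category on a match; emit labels from the flags."""
--     keywords = [
--         ('customer', 0), ('client', 0), ('satisfaction', 0), ('feedback', 0), ('review', 0),
--         ('revenue', 1), ('money', 1), ('profit', 1), ('income', 1), ('sales', 1),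
--         ('service', 2), ('cut', 2), ('trim', 2), ('styling', 2), ('performance', 2),
--         ('schedule', 3), ('appointment', 3), ('booking', 3), ('time', 3),
--         ('marketing', 4), ('promotion', 4), ('social', 4), ('advertising', 4),
--     ]
--     labels = [
--         ['customer_insights', 'customer_feedback'],
--         ['revenue_patterns'],
--         ['service_performance'],
--         ['scheduling_analytics'],
--         ['marketing_effectiveness'],
--     ]
--     q = query.lower()
--     hit = [False] * 5
--     for i in range(len(q)):
--         for w, cat in keywords:
--             if not hit[cat] and q.startswith(w, i):
--                 hit[cat] = True
--     out = [lab for ok, labs in zip(hit, labels) if ok for lab in labs]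
--     return out or ['customer_insights', 'service_performance',
--                    'revenue_patterns', 'operational_best_practices']
-- ===== Notes on version B (the rewrite author's own statement) =====
-- stated objective: alternative
-- what changed: Replaced the five per-group if/any substring-search blocks by a single left-to-right scan of the query that tries every keyword of one keyword-to-category table at each position, accumulating a category flag array, then emits labels from the flags (same order and fallback).
import Mathlib
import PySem

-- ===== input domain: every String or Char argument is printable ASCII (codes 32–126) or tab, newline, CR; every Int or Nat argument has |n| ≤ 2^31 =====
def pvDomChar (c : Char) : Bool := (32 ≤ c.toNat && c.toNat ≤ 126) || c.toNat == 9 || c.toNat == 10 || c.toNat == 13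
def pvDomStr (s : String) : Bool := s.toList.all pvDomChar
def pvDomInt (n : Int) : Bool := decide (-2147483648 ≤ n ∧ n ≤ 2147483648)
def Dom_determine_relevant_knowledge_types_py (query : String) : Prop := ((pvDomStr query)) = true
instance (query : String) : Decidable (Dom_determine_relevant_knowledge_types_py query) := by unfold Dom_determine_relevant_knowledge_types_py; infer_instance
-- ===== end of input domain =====

-- B replaces the five per-group any/substring checks by a single positional scan of the
-- lowercased query against one keyword→category table, accumulating category flags
-- (objective: alternative — a multi-pattern scan instead of per-group searches).

-- ===== PORT A =====
def determine_relevant_knowledge_types_py (query : String) : List String :=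
  let query_lower := PySem.Str.lower query
  let relevant_types : List String := []
  let relevant_types :=
    if ["customer", "client", "satisfaction", "feedback", "review"].any
        (fun w => PySem.Str.isIn w query_lower) then
      relevant_types ++ ["customer_insights", "customer_feedback"]
    else relevant_types
  let relevant_types :=
    if ["revenue", "money", "profit", "income", "sales"].any
        (fun w => PySem.Str.isIn w query_lower) then
      relevant_types ++ ["revenue_patterns"]
    else relevant_types
  let relevant_types :=
    if ["service", "cut", "trim", "styling", "performance"].any
        (fun w => PySem.Str.isIn w query_lower) then
      relevant_types ++ ["service_performance"]
    else relevant_types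
  let relevant_types :=
    if ["schedule", "appointment", "booking", "time"].any
        (fun w => PySem.Str.isIn w query_lower) then
      relevant_types ++ ["scheduling_analytics"]
    else relevant_types
  let relevant_types :=
    if ["marketing", "promotion", "social", "advertising"].any
        (fun w => PySem.Str.isIn w query_lower) then
      relevant_types ++ ["marketing_effectiveness"]
    else relevant_types
  if relevant_types = [] then
    ["customer_insights", "service_performance", "revenue_patterns", "operational_best_practices"]
  else relevant_types

-- ===== PORT B =====
-- keyword → category table of Source B
def pvKeywords : List (String × Nat) :=
  [("customer", 0), ("client", 0), ("satisfaction", 0), ("feedback", 0), ("review", 0),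
   ("revenue", 1), ("money", 1), ("profit", 1), ("income", 1), ("sales", 1),
   ("service", 2), ("cut", 2), ("trim", 2), ("styling", 2), ("performance", 2),
   ("schedule", 3), ("appointment", 3), ("booking", 3), ("time", 3),
   ("marketing", 4), ("promotion", 4), ("social", 4), ("advertising", 4)]

def pvLabels : List (List String) :=
  [["customer_insights", "customer_feedback"], ["revenue_patterns"], ["service_performance"],
   ["scheduling_analytics"], ["marketing_effectiveness"]]

-- inner loop body of Source B: `for w, cat in keywords: if not hit[cat] and q.startswith(w, i): hit[cat] = True`.
-- q.startswith(w, i) for 0 ≤ i < len(q) is exactly `PySem.Chars.startswith (q.drop i) w`;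
-- hit[cat] is total in Python (cat < 5 = len(hit) always), ported as getD/set.
def pvScanStep (q : List Char) (hit : List Bool) (i : Nat) : List Bool :=
  pvKeywords.foldl
    (fun h p => if !(h.getD p.2 false) && PySem.Chars.startswith (q.drop i) p.1.toList
                then h.set p.2 true else h) hit

def determine_relevant_knowledge_types_py_alt (query : String) : List String :=
  let q := (PySem.Str.lower query).toList
  let hit := (List.range q.length).foldl (pvScanStep q) [false, false, false, false, false]
  let out := (hit.zip pvLabels).flatMap (fun p => if p.1 then p.2 else [])
  if out = [] then
    ["customer_insights", "service_performance", "revenue_patterns", "operational_best_practices"]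
  else out

-- ===== PRECONDITION & SPEC =====
def Spec_determine_relevant_knowledge_types_py (query : String) (out : List String) : Prop := out = determine_relevant_knowledge_types_py_alt query
instance (query : String) (out : List String) : Decidable (Spec_determine_relevant_knowledge_types_py query out) := by unfold Spec_determine_relevant_knowledge_types_py; infer_instance

-- ===== CLAIM (what is proved, stated in full; the proofs are below) =====
def Claim_equal_determine_relevant_knowledge_types_py : Prop := ∀ (query : String), Dom_determine_relevant_knowledge_types_py query → Spec_determine_relevant_knowledge_types_py query (determine_relevant_knowledge_types_py query)

-- ===== LEMMAS AND PROOFS =====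

-- the inner fold over the keyword table preserves the length of the flag list
theorem pvFoldSet_length (r : List Char) (kws : List (String × Nat)) (h : List Bool) :
    (kws.foldl (fun h p => if !(h.getD p.2 false) && PySem.Chars.startswith r p.1.toList
                           then h.set p.2 true else h) h).length = h.length := by
  induction kws generalizing h with
  | nil => rfl
  | cons p rest ih =>
      simp only [List.foldl_cons]
      rw [ih]
      split <;> simp

-- the inner fold ORs each category flag with "some keyword of that category starts at r"
theorem pvFoldSet_getD (r : List Char) (kws : List (String × Nat)) (h : List Bool) (c : Nat)
    (hk : ∀ p ∈ kws, p.2 < h.length) :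
    (kws.foldl (fun h p => if !(h.getD p.2 false) && PySem.Chars.startswith r p.1.toList
                           then h.set p.2 true else h) h).getD c false
      = (h.getD c false || kws.any (fun p => p.2 == c && PySem.Chars.startswith r p.1.toList)) := by
  induction kws generalizing h with
  | nil => simp
  | cons p rest ih =>
      have hp : p.2 < h.length := hk p (by simp)
      have hrest : ∀ x ∈ rest, x.2 < h.length := fun x hx => hk x (by simp [hx])
      simp only [List.foldl_cons, List.any_cons]
      by_cases hg : (!(h.getD p.2 false) && PySem.Chars.startswith r p.1.toList) = true
      · rw [if_pos hg, ih _ (by simpa using hrest)]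
        obtain ⟨hnf, hsw⟩ := Bool.and_eq_true_iff.mp hg
        by_cases hc : p.2 = c
        · subst hc
          have hs : (h.set p.2 true).getD p.2 false = true := by
            simp [List.getD_eq_getElem?_getD, hp]
          rw [hs]
          simp [hsw]
        · have hs : (h.set p.2 true).getD c false = h.getD c false := by
            simp [List.getD_eq_getElem?_getD, hc]
          rw [hs, beq_eq_false_iff_ne.mpr hc]
          simp
      · rw [if_neg hg, ih _ hrest]
        by_cases hc : p.2 = c
        · subst hc
          by_cases hsw : PySem.Chars.startswith r p.1.toList = true
          · simp [hsw] at hg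
            simp [hg, hsw]
          · rw [Bool.not_eq_true] at hsw
            simp [hsw]
        · rw [beq_eq_false_iff_ne.mpr hc]
          simp

-- the outer fold over positions ORs each flag with "some keyword of the category occurs at some position"
theorem pvScan_getD (q : List Char) (l : List Nat) (h : List Bool) (c : Nat)
    (hk : ∀ p ∈ pvKeywords, p.2 < h.length) :
    (l.foldl (pvScanStep q) h).getD c false
      = (h.getD c false ||
         l.any (fun i => pvKeywords.any (fun p => p.2 == c && PySem.Chars.startswith (q.drop i) p.1.toList))) := by
  induction l generalizing h with
  | nil => simp
  | cons i rest ih =>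
      simp only [List.foldl_cons, List.any_cons]
      rw [ih _ (by rw [pvScanStep, pvFoldSet_length]; exact hk),
          pvScanStep, pvFoldSet_getD _ _ _ _ hk, Bool.or_assoc]

theorem pvScanFold_length (q : List Char) (l : List Nat) (h : List Bool) :
    (l.foldl (pvScanStep q) h).length = h.length := by
  induction l generalizing h with
  | nil => rfl
  | cons i rest ih => simp only [List.foldl_cons]; rw [ih, pvScanStep, pvFoldSet_length]

theorem pvList5 (l : List Bool) (hl : l.length = 5) :
    l = [l.getD 0 false, l.getD 1 false, l.getD 2 false, l.getD 3 false, l.getD 4 false] := by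
  match l, hl with
  | [a, b, c, d, e], _ => simp [List.getD]

theorem pvAnyOr {α : Type} (l : List α) (f g : α → Bool) :
    l.any (fun x => f x || g x) = (l.any f || l.any g) := by
  induction l with
  | nil => rfl
  | cons a t ih =>
      simp only [List.any_cons, ih]
      cases f a <;> cases g a <;> simp

-- scanning every position for one (nonempty) keyword is substring search
theorem pvScanWord (q : List Char) (w : String) (hw : ¬ w.toList = []) :
    (List.range q.length).any (fun i => PySem.Chars.startswith (q.drop i) w.toList)
      = PySem.Chars.isIn w.toList q := by
  have key := PySem.Chars.exists_prefix_drop_iff_isIn w.toList q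
  rcases hin : PySem.Chars.isIn w.toList q with _ | _
  · rw [hin] at key
    simp only [List.any_eq_false, List.mem_range]
    intro i _
    rw [Bool.not_eq_true]
    by_contra hs
    rw [Bool.not_eq_false] at hs
    have : ∃ j, w.toList <+: q.drop j := ⟨i, (PySem.Chars.startswith_iff _ _).mp hs⟩
    simp [this] at key
  · rw [hin] at key
    obtain ⟨j, hj⟩ := key.mpr rfl
    have hjlt : j < q.length := by
      by_contra hge
      rw [List.drop_eq_nil_of_le (by omega)] at hj
      exact hw (List.prefix_nil.mp hj)
    simp only [List.any_eq_true, List.mem_range]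
    exact ⟨j, hjlt, (PySem.Chars.startswith_iff _ _).mpr hj⟩

-- ===== VERDICT (by name: the statement is the Claim_ definition above) =====
theorem determine_relevant_knowledge_types_py_spec : Claim_equal_determine_relevant_knowledge_types_py := by
  intro query _
  unfold Spec_determine_relevant_knowledge_types_py
  unfold determine_relevant_knowledge_types_py determine_relevant_knowledge_types_py_alt
  dsimp only
  set q := (PySem.Str.lower query).toList with hq
  have hk : ∀ p ∈ pvKeywords, p.2 < ([false, false, false, false, false] : List Bool).length := by decide
  set hit := (List.range q.length).foldl (pvScanStep q) [false, false, false, false, false] with hhit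
  have hlen : hit.length = 5 := by rw [hhit, pvScanFold_length]; rfl
  have hc : ∀ c, hit.getD c false
      = (List.range q.length).any (fun i => pvKeywords.any
          (fun p => p.2 == c && PySem.Chars.startswith (q.drop i) p.1.toList)) := by
    intro c
    have hz : ([false, false, false, false, false] : List Bool).getD c false = false := by
      rcases c with _ | _ | _ | _ | _ | c <;> rfl
    rw [hhit, pvScan_getD _ _ _ _ hk, hz, Bool.false_or]
  have h0 : hit.getD 0 false
      = (PySem.Chars.isIn "customer".toList q || (PySem.Chars.isIn "client".toList q ||
         (PySem.Chars.isIn "satisfaction".toList q || (PySem.Chars.isIn "feedback".toList q ||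
          PySem.Chars.isIn "review".toList q)))) := by
    rw [hc 0]
    simp only [pvKeywords, List.any_cons, List.any_nil, Bool.or_false, Bool.true_and,
      Bool.false_and, Nat.reduceBEq, beq_self_eq_true]
    simp only [pvAnyOr]
    rw [pvScanWord q "customer" (by decide), pvScanWord q "client" (by decide),
        pvScanWord q "satisfaction" (by decide), pvScanWord q "feedback" (by decide),
        pvScanWord q "review" (by decide)]
  have h1 : hit.getD 1 false
      = (PySem.Chars.isIn "revenue".toList q || (PySem.Chars.isIn "money".toList q ||
         (PySem.Chars.isIn "profit".toList q || (PySem.Chars.isIn "income".toList q ||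
          PySem.Chars.isIn "sales".toList q)))) := by
    rw [hc 1]
    simp only [pvKeywords, List.any_cons, List.any_nil, Bool.or_false, Bool.false_or, Bool.true_and,
      Bool.false_and, Nat.reduceBEq, beq_self_eq_true]
    simp only [pvAnyOr]
    rw [pvScanWord q "revenue" (by decide), pvScanWord q "money" (by decide),
        pvScanWord q "profit" (by decide), pvScanWord q "income" (by decide),
        pvScanWord q "sales" (by decide)]
  have h2 : hit.getD 2 false
      = (PySem.Chars.isIn "service".toList q || (PySem.Chars.isIn "cut".toList q ||
         (PySem.Chars.isIn "trim".toList q || (PySem.Chars.isIn "styling".toList q ||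
          PySem.Chars.isIn "performance".toList q)))) := by
    rw [hc 2]
    simp only [pvKeywords, List.any_cons, List.any_nil, Bool.or_false, Bool.false_or, Bool.true_and,
      Bool.false_and, Nat.reduceBEq, beq_self_eq_true]
    simp only [pvAnyOr]
    rw [pvScanWord q "service" (by decide), pvScanWord q "cut" (by decide),
        pvScanWord q "trim" (by decide), pvScanWord q "styling" (by decide),
        pvScanWord q "performance" (by decide)]
  have h3 : hit.getD 3 false
      = (PySem.Chars.isIn "schedule".toList q || (PySem.Chars.isIn "appointment".toList q ||
         (PySem.Chars.isIn "booking".toList q || PySem.Chars.isIn "time".toList q))) := by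
    rw [hc 3]
    simp only [pvKeywords, List.any_cons, List.any_nil, Bool.or_false, Bool.false_or, Bool.true_and,
      Bool.false_and, Nat.reduceBEq, beq_self_eq_true]
    simp only [pvAnyOr]
    rw [pvScanWord q "schedule" (by decide), pvScanWord q "appointment" (by decide),
        pvScanWord q "booking" (by decide), pvScanWord q "time" (by decide)]
  have h4 : hit.getD 4 false
      = (PySem.Chars.isIn "marketing".toList q || (PySem.Chars.isIn "promotion".toList q ||
         (PySem.Chars.isIn "social".toList q || PySem.Chars.isIn "advertising".toList q))) := by
    rw [hc 4]
    simp only [pvKeywords, List.any_cons, List.any_nil, Bool.or_false, Bool.false_or, Bool.true_and,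
      Bool.false_and, Nat.reduceBEq, beq_self_eq_true]
    simp only [pvAnyOr]
    rw [pvScanWord q "marketing" (by decide), pvScanWord q "promotion" (by decide),
        pvScanWord q "social" (by decide), pvScanWord q "advertising" (by decide)]
  have hfinal := pvList5 hit hlen
  rw [h0, h1, h2, h3, h4] at hfinal
  rw [hfinal]
  simp only [List.any_cons, List.any_nil, Bool.or_false, PySem.Str.isIn_eq, ← hq]
  generalize (PySem.Chars.isIn "customer".toList q || (PySem.Chars.isIn "client".toList q ||
         (PySem.Chars.isIn "satisfaction".toList q || (PySem.Chars.isIn "feedback".toList q ||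
          PySem.Chars.isIn "review".toList q)))) = b0
  generalize (PySem.Chars.isIn "revenue".toList q || (PySem.Chars.isIn "money".toList q ||
         (PySem.Chars.isIn "profit".toList q || (PySem.Chars.isIn "income".toList q ||
          PySem.Chars.isIn "sales".toList q)))) = b1
  generalize (PySem.Chars.isIn "service".toList q || (PySem.Chars.isIn "cut".toList q ||
         (PySem.Chars.isIn "trim".toList q || (PySem.Chars.isIn "styling".toList q ||
          PySem.Chars.isIn "performance".toList q)))) = b2
  generalize (PySem.Chars.isIn "schedule".toList q || (PySem.Chars.isIn "appointment".toList q ||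
         (PySem.Chars.isIn "booking".toList q || PySem.Chars.isIn "time".toList q))) = b3
  generalize (PySem.Chars.isIn "marketing".toList q || (PySem.Chars.isIn "promotion".toList q ||
         (PySem.Chars.isIn "social".toList q || PySem.Chars.isIn "advertising".toList q))) = b4
  cases b0 <;> cases b1 <;> cases b2 <;> cases b3 <;> cases b4 <;> decide
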